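-- pv_equiv track=rewrite | github.com/MagaiM/group-generator | generate_groups.py | have_been_together
-- ===== SOURCE A (Python) =====
-- def have_been_together(formed_prev_groups):
--     every_one = []
--     have_been_together_with = {}
--     for i in range(len(formed_prev_groups)):
--         for j in range(len(formed_prev_groups[i])):
--             if formed_prev_groups[i][j] not in every_one:
--                 every_one.append(formed_prev_groups[i][j])
--                 have_been_together_with[formed_prev_groups[i][j]] = []
--     for i in range(len(formed_prev_groups)):
--         for name in have_been_together_with:
--             if name in formed_prev_groups[i]:
--                 for j in range(len(formed_prev_groups[i])):
--                     if formed_prev_groups[i][j] not in have_been_together_with[name]: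
--                         have_been_together_with[name].append(formed_prev_groups[i][j])
--     return have_been_together_with, every_one
-- ===== SOURCE B (Python) =====
-- def have_been_together(formed_prev_groups):
--     companions = {}
--     seen = {}
--     every_one = []
--     for group in formed_prev_groups:
--         for name in group:
--             if name not in companions:
--                 companions[name] = []
--                 seen[name] = set()
--                 every_one.append(name)
--         for name in group:
--             lst = companions[name]
--             s = seen[name]
--             for other in group:
--                 if other not in s:
--                     s.add(other)
--                     lst.append(other)
--     return companions, every_one
-- ===== Notes on version B (the rewrite author's own statement) =====
-- stated objective: faster
-- what changed: Single pass over the rounds touching only each group's own members, with a per-person seen-set giving O(1) dedup while appending to the ordered companion list, instead of A's two full passes where every round rescans the entire dict of all known people and deduplicates by scanning the companion lists.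
import Mathlib
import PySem

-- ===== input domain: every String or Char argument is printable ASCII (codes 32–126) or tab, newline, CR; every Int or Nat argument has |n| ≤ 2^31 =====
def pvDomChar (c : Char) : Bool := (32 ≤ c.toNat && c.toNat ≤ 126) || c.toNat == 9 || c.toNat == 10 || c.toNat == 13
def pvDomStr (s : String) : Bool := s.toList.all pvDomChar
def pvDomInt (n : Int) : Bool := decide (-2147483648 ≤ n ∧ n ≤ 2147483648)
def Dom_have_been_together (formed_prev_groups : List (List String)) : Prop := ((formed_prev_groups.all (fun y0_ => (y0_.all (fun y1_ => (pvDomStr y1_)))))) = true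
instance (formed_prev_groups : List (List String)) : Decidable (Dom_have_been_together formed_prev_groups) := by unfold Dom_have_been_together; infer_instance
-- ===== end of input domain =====

-- B does one pass over the rounds touching only each group's own members, instead of A's
-- two full passes that rescan the whole dict of all known people for every round (faster).

-- ===== PORT A =====
-- pass 1: collect every_one (first-occurrence order) and seed the dict with empty lists;
-- pass 2: for every round, for every known name, if the name is in that round's group,
-- append the group's members not yet recorded for that name.
def have_been_together (formed_prev_groups : List (List String)) : (List (String × List String)) × List String :=
  let st := formed_prev_groups.foldl
    (fun (st : List String × PySem.Dict String (List String)) g =>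
      g.foldl
        (fun (st2 : List String × PySem.Dict String (List String)) x =>
          if x ∈ st2.1 then st2
          else (st2.1 ++ [x], st2.2.insert x ([] : List String)))
        st)
    ([], PySem.Dict.empty)
  let d := formed_prev_groups.foldl
    (fun (d : PySem.Dict String (List String)) g =>
      d.keys.foldl
        (fun (d : PySem.Dict String (List String)) name =>
          if name ∈ g then
            g.foldl
              (fun (d : PySem.Dict String (List String)) x =>
                if x ∈ d.getD name [] then d
                else d.modify name [] (fun l => l ++ [x]))
              d
          else d)
        d)
    st.2
  (d.items, st.1)

-- ===== PORT B =====
-- one pass: per round, first register the group's unseen members (companion list, seen-set,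
-- every_one), then extend each member's companion list with this group's members, using the
-- member's seen-set for the dedup test (in-place mutation = re-insert at the existing key).
def have_been_together_alt (formed_prev_groups : List (List String)) : (List (String × List String)) × List String :=
  let st := formed_prev_groups.foldl
    (fun (st : PySem.Dict String (List String) × PySem.Dict String (PySem.Set String) × List String) g =>
      let st1 := g.foldl
        (fun (st : PySem.Dict String (List String) × PySem.Dict String (PySem.Set String) × List String) name =>
          if st.1.contains name then st
          else (st.1.insert name ([] : List String), st.2.1.insert name PySem.Set.empty,
                st.2.2 ++ [name]))
        st
      let d2 := g.foldl
        (fun (p : PySem.Dict String (List String) × PySem.Dict String (PySem.Set String)) name =>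
          let r := g.foldl
            (fun (ls : List String × PySem.Set String) other =>
              if PySem.Set.contains ls.2 other then ls
              else (ls.1 ++ [other], PySem.Set.add ls.2 other))
            (p.1.getD name [], p.2.getD name PySem.Set.empty)
          (p.1.insert name r.1, p.2.insert name r.2))
        (st1.1, st1.2.1)
      (d2.1, d2.2, st1.2.2))
    (PySem.Dict.empty, PySem.Dict.empty, [])
  (st.1.items, st.2.2)

-- ===== PRECONDITION & SPEC =====
def Spec_have_been_together (formed_prev_groups : List (List String)) (out : (List (String × List String)) × List String) : Prop := out = have_been_together_alt formed_prev_groups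
instance (formed_prev_groups : List (List String)) (out : (List (String × List String)) × List String) : Decidable (Spec_have_been_together formed_prev_groups out) := by unfold Spec_have_been_together; infer_instance

-- ===== CLAIM (what is proved, stated in full; the proofs are below) =====
def Claim_equal_have_been_together : Prop := ∀ (formed_prev_groups : List (List String)), Dom_have_been_together formed_prev_groups → Spec_have_been_together formed_prev_groups (have_been_together formed_prev_groups)

-- ===== LEMMAS AND PROOFS =====

-- dedup-extend: append each member of g not already present (the shape of every loop here)
def updG (g l : List String) : List String :=
  g.foldl (fun l x => if x ∈ l then l else l ++ [x]) l

-- first-occurrence list of all people after the rounds P, continuing eo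
def eoF (P : List (List String)) (eo : List String) : List String :=
  P.foldl (fun eo g => updG g eo) eo

-- companion list of n after the rounds P, continuing l
def valF (P : List (List String)) (n : String) (l : List String) : List String :=
  P.foldl (fun l g => if n ∈ g then updG g l else l) l

theorem updG_nil (l : List String) : updG [] l = l := rfl

theorem updG_cons (a : String) (g l : List String) :
    updG (a :: g) l = updG g (if a ∈ l then l else l ++ [a]) := rfl

theorem mem_updG {g l : List String} {x : String} : x ∈ updG g l ↔ x ∈ l ∨ x ∈ g := by
  induction g generalizing l with
  | nil => simp [updG_nil]
  | cons a g ih =>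
    rw [updG_cons]
    by_cases h : a ∈ l <;> simp [h, ih]
    · exact ⟨fun h' => h'.elim Or.inl (fun h2 => Or.inr (Or.inr h2)),
        fun h' => h'.elim Or.inl (fun h2 => h2.elim (fun e => Or.inl (e ▸ h)) Or.inr)⟩
    · tauto

theorem nodup_updG {g l : List String} (h : l.Nodup) : (updG g l).Nodup := by
  induction g generalizing l with
  | nil => simpa [updG_nil] using h
  | cons a g ih =>
    rw [updG_cons]
    by_cases ha : a ∈ l
    · simpa [ha] using ih h
    · rw [if_neg ha]
      exact ih (by simp [List.nodup_append, h]; exact fun a1 h1 e => ha (e ▸ h1))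

theorem updG_of_subset {g l : List String} (h : ∀ x ∈ g, x ∈ l) : updG g l = l := by
  induction g generalizing l with
  | nil => rfl
  | cons a g ih =>
    rw [updG_cons, if_pos (h a (by simp))]
    exact ih fun x hx => h x (by simp [hx])

theorem updG_idem (g l : List String) : updG g (updG g l) = updG g l :=
  updG_of_subset fun _ hx => mem_updG.mpr (Or.inr hx)

theorem eoF_nil (eo : List String) : eoF [] eo = eo := rfl

theorem eoF_cons (g : List String) (P : List (List String)) (eo : List String) :
    eoF (g :: P) eo = eoF P (updG g eo) := rfl

theorem nodup_eoF {P : List (List String)} {eo : List String} (h : eo.Nodup) :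
    (eoF P eo).Nodup := by
  induction P generalizing eo with
  | nil => simpa [eoF_nil] using h
  | cons g P ih => exact ih (nodup_updG h)

theorem valF_nil (n : String) (l : List String) : valF [] n l = l := rfl

theorem valF_cons (g : List String) (P : List (List String)) (n : String) (l : List String) :
    valF (g :: P) n l = valF P n (if n ∈ g then updG g l else l) := rfl

theorem keys_shape {eo : List String} {v : String → List String}
    {d : PySem.Dict String (List String)} (hd : d.items = eo.map fun n => (n, v n)) :
    d.keys = eo := by
  simp only [PySem.Dict.keys, hd, List.map_map]
  conv_rhs => rw [← List.map_id eo]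
  exact List.map_congr_left fun n _ => rfl

theorem getD_shape {eo : List String} {v : String → List String}
    {d : PySem.Dict String (List String)} (hnd : eo.Nodup)
    (hd : d.items = eo.map fun n => (n, v n)) {name : String} (hm : name ∈ eo) :
    d.getD name [] = v name := by
  refine PySem.Dict.getD_of_mem_items d ?_ ?_ []
  · rw [hd]; exact List.mem_map_of_mem hm
  · rw [keys_shape hd]; exact hnd

-- modify on a shaped dict rewrites one entry in place
theorem items_modify_shape {eo : List String} {v : String → List String}
    {d : PySem.Dict String (List String)} (hnd : eo.Nodup)
    (hd : d.items = eo.map fun n => (n, v n)) {name : String} (hm : name ∈ eo)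
    (f : List String → List String) :
    (d.modify name [] f).items = eo.map fun n => (n, if n = name then f (v n) else v n) := by
  have hkeys : d.keys = eo := by
    simp only [PySem.Dict.keys, hd, List.map_map]
    conv_rhs => rw [← List.map_id eo]
    exact List.map_congr_left fun n _ => rfl
  have hc : d.contains name = true := by
    rw [PySem.Dict.contains_eq_decide_mem_keys, hkeys]; simp [hm]
  have hget : d.getD name [] = v name := by
    refine PySem.Dict.getD_of_mem_items d ?_ ?_ []
    · rw [hd]; exact List.mem_map_of_mem hm
    · rw [hkeys]; exact hnd
  show (d.insert name (f (d.getD name []))).items = _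
  rw [PySem.Dict.items_insert_of_contains _ _ hc, hd, hget, List.map_map]
  refine List.map_congr_left fun n hn => ?_
  by_cases h : n = name
  · subst h; simp
  · simp [Function.comp, h]

-- insert at an existing key rewrites one entry in place
theorem items_insert_shape {eo : List String} {v : String → List String}
    {d : PySem.Dict String (List String)} (_hnd : eo.Nodup)
    (hd : d.items = eo.map fun n => (n, v n)) {name : String} (hm : name ∈ eo)
    (w : List String) :
    (d.insert name w).items = eo.map fun n => (n, if n = name then w else v n) := by
  have hc : d.contains name = true := by
    rw [PySem.Dict.contains_eq_decide_mem_keys, keys_shape hd]; simp [hm]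
  rw [PySem.Dict.items_insert_of_contains _ _ hc, hd, List.map_map]
  refine List.map_congr_left fun n hn => ?_
  by_cases h : n = name
  · subst h; simp
  · simp [Function.comp, h]

-- A's innermost loop at a fixed name is an in-place updG of that entry
theorem A_inner {g : List String} : ∀ {eo : List String} {v : String → List String}
    {d : PySem.Dict String (List String)}, eo.Nodup →
    d.items = (eo.map fun n => (n, v n)) → ∀ {name : String}, name ∈ eo →
    (g.foldl (fun d x => if x ∈ d.getD name [] then d
                         else d.modify name [] (fun l => l ++ [x])) d).items
      = eo.map fun n => (n, if n = name then updG g (v n) else v n) := by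
  intro eo v d hnd hd name hm
  induction g generalizing v d with
  | nil =>
    rw [List.foldl_nil, hd]
    exact List.map_congr_left fun n _ => by by_cases h : n = name <;> simp [h, updG_nil]
  | cons x g ih =>
    rw [List.foldl_cons, getD_shape hnd hd hm]
    by_cases hx : x ∈ v name
    · rw [if_pos hx, ih hd]
      refine List.map_congr_left fun n _ => ?_
      by_cases h : n = name <;> simp [h, updG_cons, hx]
    · rw [if_neg hx,
        ih (v := fun n => if n = name then v n ++ [x] else v n)
          (items_modify_shape hnd hd hm _)]
      refine List.map_congr_left fun n _ => ?_
      by_cases h : n = name <;> simp [h, updG_cons, hx]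

-- generic: fold a per-name in-place update over a name list ns
theorem fold_mod {g : List String} (S : PySem.Dict String (List String) → String → PySem.Dict String (List String))
    (cond : String → Prop) [DecidablePred cond]
    (hS : ∀ (eo : List String) (v : String → List String) (d : PySem.Dict String (List String))
      (name : String), eo.Nodup → name ∈ eo → d.items = (eo.map fun n => (n, v n)) →
      (S d name).items = eo.map fun n => (n, if n = name ∧ cond name then updG g (v n) else v n)) :
    ∀ (ns : List String) {eo : List String} (v : String → List String)
      (d : PySem.Dict String (List String)), (∀ n ∈ ns, n ∈ eo) → eo.Nodup →
      d.items = (eo.map fun n => (n, v n)) →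
      (ns.foldl S d).items = eo.map fun n => (n, if n ∈ ns ∧ cond n then updG g (v n) else v n) := by
  intro ns
  induction ns with
  | nil =>
    intro eo v d _ _ hd
    rw [List.foldl_nil, hd]
    exact List.map_congr_left fun n _ => by simp
  | cons name ns ih =>
    intro eo v d hsub hnd hd
    rw [List.foldl_cons,
      ih (v := fun n => if n = name ∧ cond name then updG g (v n) else v n) _
        (fun n hn => hsub n (by simp [hn])) hnd
        (hS eo v d name hnd (hsub name (by simp)) hd)]
    refine List.map_congr_left fun n _ => ?_
    by_cases h1 : n = name
    · subst h1
      by_cases h2 : cond n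
      · by_cases h3 : n ∈ ns <;> simp [h2, h3, updG_idem]
      · simp [h2]
    · by_cases h3 : n ∈ ns <;> simp [h1, h3]

theorem items_mk (l : List (String × List String)) : (PySem.Dict.mk l).items = l := rfl

-- A, pass 1, one group
theorem A_pass1_group (g : List String) :
    ∀ (eo : List String) (d : PySem.Dict String (List String)),
      d.items = (eo.map fun n => (n, ([] : List String))) →
      (g.foldl (fun (st2 : List String × PySem.Dict String (List String)) x =>
        if x ∈ st2.1 then st2
        else (st2.1 ++ [x], st2.2.insert x ([] : List String))) (eo, d))
      = (updG g eo, PySem.Dict.mk ((updG g eo).map fun n => (n, ([] : List String)))) := by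
  induction g with
  | nil =>
    intro eo d hd
    rw [List.foldl_nil, updG_nil]
    exact Prod.ext rfl (PySem.Dict.ext (by rw [items_mk, hd]))
  | cons x g ih =>
    intro eo d hd
    rw [List.foldl_cons, updG_cons]
    by_cases hx : x ∈ eo
    · simpa [hx] using ih eo d hd
    · have hc : d.contains x = false := by
        rw [PySem.Dict.contains_eq_decide_mem_keys, keys_shape hd]; simp [hx]
      have : (d.insert x ([] : List String)).items
          = ((eo ++ [x]).map fun n => (n, ([] : List String))) := by
        rw [PySem.Dict.items_insert_of_not_contains _ _ hc, hd, List.map_append, List.map_singleton]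
      simpa [hx] using ih (eo ++ [x]) _ this

-- A, pass 1
theorem A_pass1 (P : List (List String)) :
    ∀ (eo : List String) (d : PySem.Dict String (List String)),
      d.items = (eo.map fun n => (n, ([] : List String))) →
      (P.foldl (fun (st : List String × PySem.Dict String (List String)) g =>
        g.foldl (fun st2 x => if x ∈ st2.1 then st2
                              else (st2.1 ++ [x], st2.2.insert x ([] : List String))) st) (eo, d))
      = (eoF P eo,
         PySem.Dict.mk ((eoF P eo).map fun n => (n, ([] : List String)))) := by
  induction P with
  | nil =>
    intro eo d hd
    rw [List.foldl_nil, eoF_nil]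
    exact Prod.ext rfl (PySem.Dict.ext (by rw [items_mk, hd]))
  | cons g P ih =>
    intro eo d hd
    rw [List.foldl_cons, A_pass1_group g eo d hd, eoF_cons]
    exact ih (updG g eo) _ (items_mk _)

-- A, pass 2
theorem A_pass2 (P : List (List String)) :
    ∀ {eo : List String} (v : String → List String) (d : PySem.Dict String (List String)),
      eo.Nodup → d.items = (eo.map fun n => (n, v n)) →
      (P.foldl (fun (d : PySem.Dict String (List String)) g =>
        d.keys.foldl (fun d name =>
          if name ∈ g then
            g.foldl (fun d x => if x ∈ d.getD name [] then d
                                else d.modify name [] (fun l => l ++ [x])) d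
          else d) d) d).items
      = eo.map fun n => (n, valF P n (v n)) := by
  induction P with
  | nil =>
    intro eo v d _ hd
    rw [List.foldl_nil, hd]
    exact List.map_congr_left fun n _ => by rw [valF_nil]
  | cons g P ih =>
    intro eo v d hnd hd
    rw [List.foldl_cons]
    have hstep : (d.keys.foldl (fun d name =>
        if name ∈ g then
          g.foldl (fun d x => if x ∈ d.getD name [] then d
                              else d.modify name [] (fun l => l ++ [x])) d
        else d) d).items
        = eo.map fun n => (n, if n ∈ eo ∧ n ∈ g then updG g (v n) else v n) := by
      rw [keys_shape hd]
      refine fold_mod _ (fun name => name ∈ g) ?_ eo v d (fun n hn => hn) hnd hd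
      intro eo v d name hnd hm hd
      by_cases hg : name ∈ g
      · rw [if_pos hg, A_inner hnd hd hm]
        exact List.map_congr_left fun n _ => by by_cases h : n = name <;> simp [h, hg]
      · rw [if_neg hg, hd]
        exact List.map_congr_left fun n _ => by simp [hg]
    rw [ih _ _ hnd hstep]
    exact List.map_congr_left fun n hn => by simp [valF_cons, hn]

-- B, inner dedup loop: companion list and seen-set hold the same elements in the same order
theorem inner_pair (g : List String) : ∀ l : List String,
    (g.foldl (fun (ls : List String × PySem.Set String) other =>
      if PySem.Set.contains ls.2 other then ls
      else (ls.1 ++ [other], PySem.Set.add ls.2 other)) (l, l))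
    = (updG g l, updG g l) := by
  induction g with
  | nil => intro l; rw [List.foldl_nil, updG_nil]
  | cons x g ih =>
    intro l
    rw [List.foldl_cons, updG_cons]
    by_cases hx : x ∈ l
    · rw [if_pos (show PySem.Set.contains (l, l).2 x = true by simpa [PySem.Set.contains] using hx),
        if_pos hx]
      exact ih l
    · rw [if_neg (show ¬ PySem.Set.contains (l, l).2 x = true by simpa [PySem.Set.contains] using hx),
        if_neg hx]
      have hadd : (PySem.Set.add (l, l).2 x : PySem.Set String) = l ++ [x] := by
        simp [PySem.Set.add, PySem.Set.contains, hx]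
      rw [show ((l, l).1 : List String) = l from rfl, hadd]
      exact ih (l ++ [x])

-- a loop that keeps the two dicts identical is one loop run twice
theorem foldl_diag
    (step : (PySem.Dict String (List String) × PySem.Dict String (PySem.Set String)) → String →
      (PySem.Dict String (List String) × PySem.Dict String (PySem.Set String)))
    (S : PySem.Dict String (List String) → String → PySem.Dict String (List String))
    (ns : List String)
    (h : ∀ (c : PySem.Dict String (List String)) (name : String), name ∈ ns →
      step (c, c) name = (S c name, S c name)) :
    ∀ c : PySem.Dict String (List String), ns.foldl step (c, c) = (ns.foldl S c, ns.foldl S c) := by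
  induction ns with
  | nil => intro c; rfl
  | cons x ns ih =>
    intro c
    rw [List.foldl_cons, List.foldl_cons, h c x (by simp)]
    exact ih (fun c name hn => h c name (by simp [hn])) _

-- B, key-registration loop of one group
theorem B_keys (g : List String) :
    ∀ (eo : List String) (v : String → List String) (c : PySem.Dict String (List String)),
      c.items = (eo.map fun n => (n, v n)) →
      (g.foldl (fun (st : PySem.Dict String (List String) × PySem.Dict String (PySem.Set String) × List String) name =>
        if st.1.contains name then st
        else (st.1.insert name ([] : List String), st.2.1.insert name PySem.Set.empty,
              st.2.2 ++ [name])) (c, c, eo))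
      = (PySem.Dict.mk ((updG g eo).map fun n => (n, if n ∈ eo then v n else [])),
         PySem.Dict.mk ((updG g eo).map fun n => (n, if n ∈ eo then v n else [])),
         updG g eo) := by
  induction g with
  | nil =>
    intro eo v c hd
    rw [List.foldl_nil, updG_nil]
    have hmap : c.items = (eo.map fun n => (n, if n ∈ eo then v n else [])) := by
      rw [hd]; exact List.map_congr_left fun n hn => by simp [hn]
    exact Prod.ext (PySem.Dict.ext hmap) (Prod.ext (PySem.Dict.ext hmap) rfl)
  | cons x g ih =>
    intro eo v c hd
    rw [List.foldl_cons]
    have hc : c.contains x = decide (x ∈ eo) := by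
      rw [PySem.Dict.contains_eq_decide_mem_keys, keys_shape hd]
    by_cases hx : x ∈ eo
    · simp only [hc, hx, decide_true, if_true]
      simpa [updG_cons, hx] using ih eo v c hd
    · simp only [hc, hx, decide_false, Bool.false_eq_true, if_false]
      have hd' : (c.insert x ([] : List String)).items
          = ((eo ++ [x]).map fun n => (n, if n ∈ eo then v n else [])) := by
        rw [PySem.Dict.items_insert_of_not_contains _ _ (by simp [hc, hx]),
          hd, List.map_append, List.map_singleton]
        congr 1
        · exact List.map_congr_left fun n hn => by simp [hn]
        · simp [hx]
      rw [updG_cons, if_neg hx,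
        show (c.insert x PySem.Set.empty : PySem.Dict String (PySem.Set String))
          = c.insert x ([] : List String) from rfl,
        ih (eo ++ [x]) _ _ hd']
      have hmap : ((updG g (eo ++ [x])).map fun n => (n, if n ∈ eo ++ [x] then (if n ∈ eo then v n else []) else []))
          = ((updG g (eo ++ [x])).map fun n => (n, if n ∈ eo then v n else [])) := by
        refine List.map_congr_left fun n hn => ?_
        by_cases h1 : n ∈ eo
        · simp [h1]
        · by_cases h2 : n = x <;> simp [h1, h2]
      exact Prod.ext (PySem.Dict.ext (by rw [items_mk, items_mk, hmap]))
        (Prod.ext (PySem.Dict.ext (by rw [items_mk, items_mk, hmap])) rfl)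

-- B, whole loop
theorem B_main (P : List (List String)) :
    ∀ {eo : List String} (v : String → List String) (c : PySem.Dict String (List String)),
      eo.Nodup → c.items = (eo.map fun n => (n, v n)) →
      (P.foldl (fun (st : PySem.Dict String (List String) × PySem.Dict String (PySem.Set String) × List String) g =>
        let st1 := g.foldl
          (fun (st : PySem.Dict String (List String) × PySem.Dict String (PySem.Set String) × List String) name =>
            if st.1.contains name then st
            else (st.1.insert name ([] : List String), st.2.1.insert name PySem.Set.empty,
                  st.2.2 ++ [name]))
          st
        let d2 := g.foldl
          (fun (p : PySem.Dict String (List String) × PySem.Dict String (PySem.Set String)) name =>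
            let r := g.foldl
              (fun (ls : List String × PySem.Set String) other =>
                if PySem.Set.contains ls.2 other then ls
                else (ls.1 ++ [other], PySem.Set.add ls.2 other))
              (p.1.getD name [], p.2.getD name PySem.Set.empty)
            (p.1.insert name r.1, p.2.insert name r.2))
          (st1.1, st1.2.1)
        (d2.1, d2.2, st1.2.2)) (c, c, eo))
      = (PySem.Dict.mk ((eoF P eo).map fun n => (n, valF P n (if n ∈ eo then v n else []))),
         PySem.Dict.mk ((eoF P eo).map fun n => (n, valF P n (if n ∈ eo then v n else []))),
         eoF P eo) := by
  induction P with
  | nil =>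
    intro eo v c hnd hd
    rw [List.foldl_nil, eoF_nil]
    have hmap : c.items = (eo.map fun n => (n, valF [] n (if n ∈ eo then v n else []))) := by
      rw [hd]; exact List.map_congr_left fun n hn => by simp [hn, valF_nil]
    exact Prod.ext (PySem.Dict.ext hmap) (Prod.ext (PySem.Dict.ext hmap) rfl)
  | cons g P ih =>
    intro eo v c hnd hd
    simp only [List.foldl_cons]
    rw [B_keys g eo v c hd]
    rw [foldl_diag _ (fun c name => c.insert name (updG g (c.getD name []))) g
      (fun c name _ => by
        rw [show (c.getD name PySem.Set.empty : PySem.Set String) = c.getD name [] from rfl]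
        simp only [inner_pair g (c.getD name [])]) _]
    have h2 : (g.foldl (fun c name => c.insert name (updG g (c.getD name [])))
        (PySem.Dict.mk ((updG g eo).map fun n => (n, if n ∈ eo then v n else [])))).items
        = (updG g eo).map fun n => (n, if n ∈ g then updG g (if n ∈ eo then v n else [])
                                       else (if n ∈ eo then v n else [])) := by
      have := fold_mod (g := g)
        (fun c name => c.insert name (updG g (c.getD name [])))
        (fun _ => True)
        (fun eo v d name hnd hm hd => by
          show (d.insert name (updG g (d.getD name []))).items = _
          rw [getD_shape hnd hd hm, items_insert_shape hnd hd hm]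
          exact List.map_congr_left fun n _ => by by_cases h : n = name <;> simp [h])
        g (eo := updG g eo) (fun n => if n ∈ eo then v n else []) _
        (fun n hn => mem_updG.mpr (Or.inr hn)) (nodup_updG hnd) (items_mk _)
      rw [this]
      exact List.map_congr_left fun n _ => by by_cases h : n ∈ g <;> simp [h]
    rw [ih _ _ (nodup_updG hnd) h2, eoF_cons]
    have hmap : ((eoF P (updG g eo)).map fun n =>
          (n, valF P n (if n ∈ updG g eo then
                (if n ∈ g then updG g (if n ∈ eo then v n else []) else (if n ∈ eo then v n else []))
              else [])))
        = ((eoF P (updG g eo)).map fun n => (n, valF (g :: P) n (if n ∈ eo then v n else []))) := by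
      refine List.map_congr_left fun n hn => ?_
      rw [valF_cons]
      by_cases h1 : n ∈ updG g eo
      · simp [h1]
      · have h2 : n ∉ g := fun h => h1 (mem_updG.mpr (Or.inr h))
        have h3 : n ∉ eo := fun h => h1 (mem_updG.mpr (Or.inl h))
        simp [h1, h2, h3]
    exact Prod.ext (PySem.Dict.ext (by rw [items_mk, items_mk, hmap]))
      (Prod.ext (PySem.Dict.ext (by rw [items_mk, items_mk, hmap])) rfl)

-- ===== VERDICT (by name: the statement is the Claim_ definition above) =====
theorem have_been_together_spec : Claim_equal_have_been_together := by
  intro fpg _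
  unfold Spec_have_been_together have_been_together have_been_together_alt
  simp only [A_pass1 fpg [] PySem.Dict.empty rfl,
    B_main fpg (fun _ => ([] : List String)) PySem.Dict.empty List.nodup_nil rfl]
  rw [A_pass2 fpg (fun _ => ([] : List String)) _ (nodup_eoF List.nodup_nil) (items_mk _)]
  exact Prod.ext (List.map_congr_left fun n hn => by simp) rfl
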